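/- CARRIED OVER by tools/port_base_units.py (renaming only) from proofs.vorbis/Vorbis/Spec/Units, GENERATED there by farm/mkstatement.py from design/units.tsv (unit `cos_poly`) and the Specs of Vorbis/Spec/*.lean — do not edit.
   THE STATEMENT of the proof unit `cos_poly`: the function `cos_poly` (46 instructions) satisfies its contract,
   given the contracts of its callees. What the names mean: Vorbis/Spec/Basic.lean. The theorem to prove:
   `theorem cos_poly_ok : ProgX.Base.Spec.cos_poly.Statement`. -/
import ProgX.Base.Spec.Libm
namespace ProgX.Base.Spec.cos_poly
open X86 X86.User Asan

/-- The statement of unit `cos_poly`. -/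
def Statement : Prop :=
  ∀ (Lay : Layout) (_hLay : Lay.hi = 0x1000000) (μ : Microarch) (_hμ : UserX.MicroOK μ) (u₀ : State)
    (_hcode : HasCodeNat Lay u₀ ProgX.Base.L.cos_poly.entry ProgX.Base.Code.code_cos_poly.nat ProgX.Base.L.cos_poly.size),
    ∀ (others : List Obj) (frames : List (Nat × FrameLayout)), Calls Lay μ ProgX.Base.WayInv (ProgX.Base.conv u₀) ProgX.Base.L.cos_poly.entry (ProgX.Base.Spec.cos_poly.spec others frames)

end ProgX.Base.Spec.cos_poly
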